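-- pv_equiv track=rewrite | github.com/iblea/growcastle_leaderboard | prototype/src/db.py | set_leaderboard_data
-- ===== SOURCE A (Python) =====
-- def set_leaderboard_data(leaderboards) -> dict:
--
--     userlist_len = min(len(leaderboards), 51)
--
--     rank_monitoring_list: list[int] = [1, 2, 3, 4, 5, 6, 10, 11, 50, 51]
--     leaderboards_dict = {}
--     rank_format = "r{}"
--
--     for init_rank in rank_monitoring_list:
--         leaderboards_dict[rank_format.format(init_rank)] = -1
--
--     for i in range(userlist_len):
--         userdata = leaderboards[i]
--         rank = userdata[0]
--         score = userdata[2]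
--         if rank in rank_monitoring_list:
--             leaderboards_dict[rank_format.format(rank)] = score
--     return leaderboards_dict
-- ===== SOURCE B (Python) =====
-- def set_leaderboard_data(leaderboards) -> dict:
--     # Build a rank -> score index over the first 51 entries (later duplicates overwrite),
--     # then emit the ten monitored ranks by direct lookup with -1 default.
--     table = {}
--     for userdata in leaderboards[:51]:
--         table[userdata[0]] = userdata[2]
--     return {"r{}".format(rank): table.get(rank, -1)
--             for rank in (1, 2, 3, 4, 5, 6, 10, 11, 50, 51)}
-- ===== Notes on version B (the rewrite author's own statement) =====
-- stated objective: alternative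
-- what changed: Inverts the loop structure: instead of initialising all keys to -1 and scanning entries with a membership test against the monitored-rank list, B builds a rank->score index over the first 51 entries in one pass and then produces the result by direct lookup per monitored rank.
import Mathlib
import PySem

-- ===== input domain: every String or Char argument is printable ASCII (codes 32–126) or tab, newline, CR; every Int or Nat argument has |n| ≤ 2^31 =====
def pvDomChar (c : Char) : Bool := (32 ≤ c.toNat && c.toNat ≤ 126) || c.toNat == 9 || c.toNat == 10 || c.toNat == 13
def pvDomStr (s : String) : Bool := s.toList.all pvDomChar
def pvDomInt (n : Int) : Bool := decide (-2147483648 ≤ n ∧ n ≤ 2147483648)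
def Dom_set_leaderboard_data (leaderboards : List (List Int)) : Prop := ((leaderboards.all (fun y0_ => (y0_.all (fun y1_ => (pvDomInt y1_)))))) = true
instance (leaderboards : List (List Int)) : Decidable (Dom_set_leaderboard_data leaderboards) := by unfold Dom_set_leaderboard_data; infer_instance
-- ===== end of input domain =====

-- B inverts the loop structure: it builds a rank -> score index over the first 51 entries,
-- then emits the ten monitored keys by direct lookup (default -1); same return value as A on Pre_.

-- "r{}".format(r) = "r" + str(r), built at the character level so the kernel can evaluate it
def pvFmt (r : Int) : String := String.ofList ('r' :: PySem.Int.toChars r)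

def pvRanks : List Int := [1, 2, 3, 4, 5, 6, 10, 11, 50, 51]

-- ===== PORT A =====
def set_leaderboard_data (leaderboards : List (List Int)) : List (String × Int) :=
  let userlistLen : Int := min (leaderboards.length : Int) 51
  let d0 : PySem.Dict String Int :=
    pvRanks.foldl (fun d r => d.insert (pvFmt r) (-1)) PySem.Dict.empty
  let d : PySem.Dict String Int :=
    (PySem.List.pyRange 0 userlistLen 1).foldl (fun d i =>
      let userdata := PySem.List.pyGetD leaderboards i []   -- i < len: in range
      let rank := PySem.List.pyGetD userdata 0 0            -- Python raises IndexError when the entry is shorter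
      let score := PySem.List.pyGetD userdata 2 0           -- than 3; exactly those inputs are outside Pre_
      if rank ∈ pvRanks then d.insert (pvFmt rank) score else d) d0
  d.items

-- ===== PORT B =====
def set_leaderboard_data_alt (leaderboards : List (List Int)) : List (String × Int) :=
  let table : PySem.Dict Int Int :=
    (PySem.List.slice leaderboards none (some 51)).foldl
      (fun t u => t.insert (PySem.List.pyGetD u 0 0) (PySem.List.pyGetD u 2 0))  -- IndexError outside Pre_
      PySem.Dict.empty
  let res : PySem.Dict String Int :=
    pvRanks.foldl (fun d r => d.insert (pvFmt r) (table.getD r (-1))) PySem.Dict.empty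
  res.items

-- ===== PRECONDITION & SPEC =====
-- Pre_ excludes exactly the inputs where A raises IndexError: an entry among the
-- first min(len, 51) with fewer than 3 fields (B raises there too).
def Pre_set_leaderboard_data (leaderboards : List (List Int)) : Prop :=
  ∀ u ∈ leaderboards.take 51, 3 ≤ u.length
instance (leaderboards : List (List Int)) : Decidable (Pre_set_leaderboard_data leaderboards) := by
  unfold Pre_set_leaderboard_data; infer_instance

def pvWitness_set_leaderboard_data : List (List Int) := [[1, 0, 100], [2, 0, 90], [7, 0, 5]]

def Spec_set_leaderboard_data (leaderboards : List (List Int)) (out : List (String × Int)) : Prop := out = set_leaderboard_data_alt leaderboards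
instance (leaderboards : List (List Int)) (out : List (String × Int)) : Decidable (Spec_set_leaderboard_data leaderboards out) := by unfold Spec_set_leaderboard_data; infer_instance

-- ===== CLAIM (what is proved, stated in full; the proofs are below) =====
def Claim_equal_set_leaderboard_data : Prop := ∀ (leaderboards : List (List Int)), Dom_set_leaderboard_data leaderboards → Pre_set_leaderboard_data leaderboards → Spec_set_leaderboard_data leaderboards (set_leaderboard_data leaderboards)

-- ===== LEMMAS AND PROOFS =====

-- the result dict as a function of a rank -> score table
def pvMkD (t : PySem.Dict Int Int) : PySem.Dict String Int :=
  pvRanks.foldl (fun d r => d.insert (pvFmt r) (t.getD r (-1))) PySem.Dict.empty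

lemma pvItems_mkD (t : PySem.Dict Int Int) :
    (pvMkD t).items = pvRanks.map (fun r => (pvFmt r, t.getD r (-1))) := by
  have h := PySem.Dict.items_foldl_insert_fresh (l := pvRanks) (d := PySem.Dict.empty)
      (k := pvFmt) (v := fun r => t.getD r (-1))
      (by intro a _; simp) (by decide)
  simpa [pvMkD] using h

lemma pvFmt_inj_on : ∀ r ∈ pvRanks, ∀ c ∈ pvRanks, (pvFmt r = pvFmt c ↔ r = c) := by decide

lemma pvStep (t : PySem.Dict Int Int) (rank score : Int) :
    (if rank ∈ pvRanks then (pvMkD t).insert (pvFmt rank) score else pvMkD t)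
      = pvMkD (t.insert rank score) := by
  by_cases h : rank ∈ pvRanks
  · simp only [h, if_pos]
    apply PySem.Dict.ext
    have hc : (pvMkD t).contains (pvFmt rank) = true := by
      rw [PySem.Dict.contains_eq_decide_mem_keys]
      simp only [PySem.Dict.keys, pvItems_mkD, List.map_map]
      simp only [decide_eq_true_iff, List.mem_map, Function.comp]
      exact ⟨rank, h, rfl⟩
    rw [PySem.Dict.items_insert_of_contains _ _ hc, pvItems_mkD, pvItems_mkD, List.map_map]
    apply List.map_congr_left
    intro r hr
    simp only [Function.comp]
    by_cases hrc : r = rank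
    · subst hrc
      simp [PySem.Dict.getD_insert_self]
    · have hne : pvFmt r ≠ pvFmt rank := fun he => hrc ((pvFmt_inj_on r hr rank h).1 he)
      simp [hne, PySem.Dict.getD_insert_of_ne _ _ _ hrc]
  · simp only [h, if_false]
    apply PySem.Dict.ext
    rw [pvItems_mkD, pvItems_mkD]
    apply List.map_congr_left
    intro r hr
    have hrc : r ≠ rank := fun he => h (he ▸ hr)
    rw [PySem.Dict.getD_insert_of_ne _ _ _ hrc]

-- the two folds over the same entry list stay in lock-step
lemma pvLoop (es : List (List Int)) (t : PySem.Dict Int Int) :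
    es.foldl (fun d u =>
        if PySem.List.pyGetD u 0 0 ∈ pvRanks then
          d.insert (pvFmt (PySem.List.pyGetD u 0 0)) (PySem.List.pyGetD u 2 0)
        else d) (pvMkD t)
      = pvMkD (es.foldl
          (fun t u => t.insert (PySem.List.pyGetD u 0 0) (PySem.List.pyGetD u 2 0)) t) := by
  induction es generalizing t with
  | nil => simp only [List.foldl_nil]
  | cons e es ih =>
    simp only [List.foldl_cons]
    rw [pvStep]
    exact ih _

lemma pvInit : pvRanks.foldl (fun d r => d.insert (pvFmt r) (-1)) PySem.Dict.empty
    = pvMkD PySem.Dict.empty := by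
  simp [pvMkD, PySem.Dict.getD_empty]

-- A's index loop over range(min(len,51)) is the fold over the first-51 prefix
lemma pvRangeLoop (lb : List (List Int)) (f : PySem.Dict String Int → List Int → PySem.Dict String Int)
    (init : PySem.Dict String Int) :
    (PySem.List.pyRange 0 (min (lb.length : Int) 51) 1).foldl
        (fun d i => f d (PySem.List.pyGetD lb i [])) init
      = (lb.take 51).foldl f init := by
  have hlen : min (lb.length : Int) 51 = PySem.List.len (lb.take 51) := by
    simp [PySem.List.len, List.length_take]; omega
  rw [hlen]
  rw [← PySem.List.foldl_pyRange_zero_pyGetD (lb.take 51) [] f init]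
  apply PySem.List.foldl_congr_mem
  intro d j hj
  have hj' := PySem.List.mem_pyRange_one.1 hj
  congr 1
  have h0 : 0 ≤ j := hj'.1
  have h51 : j.toNat < 51 := by
    have := hj'.2
    simp only [PySem.List.len, List.length_take] at this
    omega
  rw [PySem.List.pyGetD_of_nonneg _ _ h0, PySem.List.pyGetD_of_nonneg _ _ h0]
  simp [List.getD_eq_getElem?_getD, h51]

lemma pvSlice (lb : List (List Int)) :
    PySem.List.slice lb none (some 51) = lb.take 51 := by
  have : (51 : Int) = ((51 : Nat) : Int) := by norm_num
  rw [this, PySem.List.slice_to_natCast]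

-- ===== VERDICT (by name: the statement is the Claim_ definition above) =====
theorem set_leaderboard_data_spec : Claim_equal_set_leaderboard_data := by
  intro lb _ _
  unfold Spec_set_leaderboard_data set_leaderboard_data set_leaderboard_data_alt
  simp only [pvSlice]
  rw [pvInit, pvRangeLoop lb
    (fun d u => if PySem.List.pyGetD u 0 0 ∈ pvRanks then
        d.insert (pvFmt (PySem.List.pyGetD u 0 0)) (PySem.List.pyGetD u 2 0) else d),
    pvLoop]
  rfl
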